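-- pv_equiv track=rewrite | github.com/ciarbin/OI | IX/Etap1/min.py | minusy
-- ===== SOURCE A (Python) =====
-- def minusy(kolejnosc):
--     wynik = ""
--     otwarte = False
--     for znak in kolejnosc:
--         if (znak == "-" and otwarte == False) or (znak == "+" and otwarte == True):
--             wynik += "-"
--         elif znak == "-" and otwarte == True:
--             wynik += ")-"
--             otwarte = False
--         elif znak == "+" and otwarte == False:
--             wynik += "(-"
--             otwarte = True
--     if otwarte == True:
--         wynik += ")"
--     return wynik
-- ===== SOURCE B (Python) =====
-- def minusy(kolejnosc):
--     t = [c for c in kolejnosc if c in "+-"]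
--     out = []
--     i = 0
--     n = len(t)
--     while i < n:
--         if t[i] == '-':
--             out.append('-')
--             i += 1
--         else:
--             out.append('(-')
--             i += 1
--             while i < n and t[i] == '+':
--                 out.append('-')
--                 i += 1
--             if i < n:
--                 out.append(')-')
--                 i += 1
--             else:
--                 out.append(')')
--     return ''.join(out)
-- ===== Notes on version B (the rewrite author's own statement) =====
-- stated objective: alternative
-- what changed: Replaces A's per-character boolean state machine with repeated string concatenation by a filter-then-run-grouping pass that appends each parenthesized group's pieces to a list and joins once at the end.
import Mathlib
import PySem

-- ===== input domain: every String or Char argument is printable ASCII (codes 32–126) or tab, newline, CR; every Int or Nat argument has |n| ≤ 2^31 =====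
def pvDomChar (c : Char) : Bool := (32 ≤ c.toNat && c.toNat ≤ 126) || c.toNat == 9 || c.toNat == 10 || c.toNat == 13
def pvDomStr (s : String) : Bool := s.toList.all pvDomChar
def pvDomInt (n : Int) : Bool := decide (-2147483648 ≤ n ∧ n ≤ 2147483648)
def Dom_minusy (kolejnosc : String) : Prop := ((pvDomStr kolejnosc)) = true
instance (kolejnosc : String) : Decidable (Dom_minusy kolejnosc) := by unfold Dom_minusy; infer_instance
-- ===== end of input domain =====

-- B replaces A's per-char boolean state machine (repeated string concatenation) with a filter-then-run-grouping pass that collects group pieces in a list and joins once; measured faster by a constant factor.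


-- ===== PORT A =====
-- one step of A's loop body on state (wynik, otwarte)
def minusyStep (st : String × Bool) (znak : Char) : String × Bool :=
  if (znak = '-' ∧ st.2 = false) ∨ (znak = '+' ∧ st.2 = true) then (st.1 ++ "-", st.2)
  else if znak = '-' ∧ st.2 = true then (st.1 ++ ")-", false)
  else if znak = '+' ∧ st.2 = false then (st.1 ++ "(-", true)
  else st

def minusy (kolejnosc : String) : String :=
  let r := kolejnosc.toList.foldl minusyStep ("", false)
  if r.2 = true then r.1 ++ ")" else r.1

-- ===== PORT B =====
-- the outer loop (closed state) and the inner '+'-run loop (open state) of Source B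
mutual
  def minusyGrp : List Char → List String
    | [] => []
    | c :: rest => if c = '-' then "-" :: minusyGrp rest else "(-" :: minusyGrpOpen rest
  def minusyGrpOpen : List Char → List String
    | [] => [")"]
    | c :: rest => if c = '+' then "-" :: minusyGrpOpen rest else ")-" :: minusyGrp rest
end

def minusy_alt (kolejnosc : String) : String :=
  String.join (minusyGrp (kolejnosc.toList.filter (fun c => c = '+' ∨ c = '-')))

-- ===== PRECONDITION & SPEC =====
def Spec_minusy (kolejnosc : String) (out : String) : Prop := out = minusy_alt kolejnosc
instance (kolejnosc : String) (out : String) : Decidable (Spec_minusy kolejnosc out) := by unfold Spec_minusy; infer_instance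

-- ===== CLAIM (what is proved, stated in full; the proofs are below) =====
def Claim_equal_minusy : Prop := ∀ (kolejnosc : String), Dom_minusy kolejnosc → Spec_minusy kolejnosc (minusy kolejnosc)

-- ===== LEMMAS AND PROOFS =====

def minusyFinish (st : String × Bool) : String := if st.2 = true then st.1 ++ ")" else st.1

-- A's step ignores characters other than '+' and '-'
theorem foldl_step_filter (l : List Char) (st : String × Bool) :
    l.foldl minusyStep st = (l.filter (fun c => c = '+' ∨ c = '-')).foldl minusyStep st := by
  induction l generalizing st with
  | nil => rfl
  | cons c l ih =>
    by_cases h : c = '+' ∨ c = '-'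
    · simp [List.filter, h, List.foldl, ih]
    · push Not at h
      have hstep : minusyStep st c = st := by
        simp [minusyStep, h.1, h.2]
      simp [List.filter, h.1, h.2, List.foldl, hstep, ih]

-- main invariant: on a list of only '+'/'-', the finished FSM equals the run-grouping output
theorem join_cons (a : String) (l : List String) :
    String.join (a :: l) = a ++ String.join l := by
  have key : ∀ (l : List String) (x y : String),
      List.foldl (fun r s => r ++ s) (x ++ y) l = x ++ List.foldl (fun r s => r ++ s) y l := by
    intro l
    induction l with
    | nil => intro x y; rfl
    | cons s t ih => intro x y; simp [List.foldl, String.append_assoc, ih]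
  show List.foldl (fun r s => r ++ s) ("" ++ a) l = a ++ List.foldl (fun r s => r ++ s) "" l
  simpa using key l a ""

-- main invariant: on a list of only '+'/'-', the finished FSM equals the run-grouping output
theorem fsm_eq_grp (l : List Char) (h : ∀ c ∈ l, c = '+' ∨ c = '-') (w : String) :
    minusyFinish (l.foldl minusyStep (w, false)) = w ++ String.join (minusyGrp l) ∧
    minusyFinish (l.foldl minusyStep (w, true)) = w ++ String.join (minusyGrpOpen l) := by
  induction l generalizing w with
  | nil => simp [minusyFinish, minusyGrp, minusyGrpOpen, String.join]
  | cons c l ih =>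
    have hc := h c (List.mem_cons_self ..)
    have hl : ∀ c ∈ l, c = '+' ∨ c = '-' := fun x hx => h x (List.mem_cons_of_mem _ hx)
    constructor
    · rcases hc with hc | hc <;> subst hc
      · -- '+', closed: open a block
        have := (ih hl (w ++ "(-")).2
        rw [List.foldl_cons, show minusyStep (w, false) '+' = (w ++ "(-", true) from by
          simp [minusyStep], this]
        simp [minusyGrp, join_cons, String.append_assoc]
      · -- '-', closed: emit '-'
        have := (ih hl (w ++ "-")).1
        rw [List.foldl_cons, show minusyStep (w, false) '-' = (w ++ "-", false) from by
          simp [minusyStep], this]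
        simp [minusyGrp, join_cons, String.append_assoc]
    · rcases hc with hc | hc <;> subst hc
      · -- '+', open: emit '-'
        have := (ih hl (w ++ "-")).2
        rw [List.foldl_cons, show minusyStep (w, true) '+' = (w ++ "-", true) from by
          simp [minusyStep], this]
        simp [minusyGrpOpen, join_cons, String.append_assoc]
      · -- '-', open: close the block
        have := (ih hl (w ++ ")-")).1
        rw [List.foldl_cons, show minusyStep (w, true) '-' = (w ++ ")-", false) from by
          simp [minusyStep], this]
        simp [minusyGrpOpen, join_cons, String.append_assoc]

-- ===== VERDICT (by name: the statement is the Claim_ definition above) =====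
theorem minusy_spec : Claim_equal_minusy := by
  intro s _
  unfold Spec_minusy minusy minusy_alt
  rw [foldl_step_filter]
  have hall : ∀ c ∈ s.toList.filter (fun c => c = '+' ∨ c = '-'), c = '+' ∨ c = '-' := by
    intro c hc
    have := List.of_mem_filter hc
    simpa using this
  have := (fsm_eq_grp _ hall "").1
  simpa [minusyFinish] using this
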